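-- pv_equiv track=rewrite | github.com/S4t0r1/Ressurection-MiniGames | tic_tac_toe_neighborchecks.py | getDiags1
-- ===== SOURCE A (Python) =====
-- def getDiags1(matrix):
--     size = len(matrix)
--     if size > 3:
--         diags, diag_horz = [], []
--         for i in range(size):
--             diag_vert = [matrix[n+i][n] for n in range(size) if n+i<=(size-1)]
--             if i > 0:
--                 diag_horz = [matrix[n][n+i] for n in range(size) if n+i<=(size-1)]
--             for lst in (diag_vert, diag_horz):
--                 if len(lst) >= 4:
--                     diags.append(lst)
--         return diags
--     return ([matrix[n][n] for n in range(size)],)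
-- ===== SOURCE B (Python) =====
-- def getDiags1(matrix):
--     size = len(matrix)
--     if size <= 3:
--         return ([matrix[n][n] for n in range(size)],)
--     buckets = {}
--     for r in range(size):
--         for c in range(size):
--             buckets.setdefault(r - c, []).append(matrix[r][c])
--     diags = []
--     for i in range(size):
--         for d in ((i,) if i == 0 else (i, -i)):
--             if len(buckets[d]) >= 4:
--                 diags.append(buckets[d])
--     return diags
-- ===== Notes on version B (the rewrite author's own statement) =====
-- stated objective: alternative
-- what changed: Replaces A's per-offset filtered range comprehensions with a single row-major pass that groups every cell into a dict keyed by r-c, then emits the length>=4 buckets in offset order 0,1,-1,2,-2,...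
import Mathlib
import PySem

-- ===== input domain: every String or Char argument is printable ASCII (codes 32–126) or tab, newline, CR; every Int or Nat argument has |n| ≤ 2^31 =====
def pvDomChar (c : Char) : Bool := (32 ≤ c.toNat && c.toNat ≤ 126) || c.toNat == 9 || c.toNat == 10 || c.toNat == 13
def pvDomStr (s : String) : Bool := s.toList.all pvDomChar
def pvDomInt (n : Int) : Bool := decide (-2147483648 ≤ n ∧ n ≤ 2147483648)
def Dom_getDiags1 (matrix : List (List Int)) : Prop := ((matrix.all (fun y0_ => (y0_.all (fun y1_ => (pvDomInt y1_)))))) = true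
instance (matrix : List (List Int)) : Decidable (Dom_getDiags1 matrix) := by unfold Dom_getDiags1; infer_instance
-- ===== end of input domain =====

-- B groups all cells into a dict keyed by r - c in one row-major pass and then emits the
-- length ≥ 4 buckets in offset order 0, 1, -1, 2, -2, … (alternative data structure, same cost).

-- ===== PORT A =====
-- In A, diag_horz starts as [] and is reassigned on every iteration with i > 0, so its
-- per-iteration value is inlined here (it is [] exactly when i = 0).
def getDiags1 (matrix : List (List Int)) : List (List Int) :=
  let size := matrix.length
  if 3 < size then
    (List.range size).foldl (fun diags i =>
      let diag_vert := ((List.range size).filter (fun n => n + i ≤ size - 1)).map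
        (fun n => (matrix.getD (n + i) []).getD n 0)
      let diag_horz := if 0 < i then
          ((List.range size).filter (fun n => n + i ≤ size - 1)).map
            (fun n => (matrix.getD n []).getD (n + i) 0)
        else []
      let diags := if 4 ≤ diag_vert.length then diags ++ [diag_vert] else diags
      if 4 ≤ diag_horz.length then diags ++ [diag_horz] else diags) []
  else
    [(List.range size).map (fun n => (matrix.getD n []).getD n 0)]

-- ===== PORT B =====
-- buckets.setdefault(r - c, []).append(v) is dict.modify at key r - c with default []
def pvBuckets (matrix : List (List Int)) (size : Nat) : PySem.Dict Int (List Int) :=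
  (List.range size).foldl (fun d (r : Nat) =>
    (List.range size).foldl (fun d (c : Nat) =>
      d.modify ((r : Int) - (c : Int)) [] (· ++ [(matrix.getD r []).getD c 0])) d)
    PySem.Dict.empty

def getDiags1_alt (matrix : List (List Int)) : List (List Int) :=
  let size := matrix.length
  if size ≤ 3 then
    [(List.range size).map (fun n => (matrix.getD n []).getD n 0)]
  else
    let buckets := pvBuckets matrix size
    (List.range size).foldl (fun diags i =>
      (if i == 0 then [((i : Nat) : Int)] else [((i : Nat) : Int), -((i : Nat) : Int)]).foldl
        (fun diags d =>
          if 4 ≤ (buckets.getD d []).length then diags ++ [buckets.getD d []] else diags)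
        diags) []

-- ===== PRECONDITION & SPEC =====
-- Pre_ excludes exactly the ragged matrices on which Python A raises IndexError:
-- for size > 3 every cell (r,c) with r,c < size is read, for size ≤ 3 only the main diagonal.
def Pre_getDiags1 (matrix : List (List Int)) : Prop :=
  if 3 < matrix.length then ∀ row ∈ matrix, matrix.length ≤ row.length
  else ∀ i ∈ List.range matrix.length, i < (matrix.getD i []).length
instance (matrix : List (List Int)) : Decidable (Pre_getDiags1 matrix) := by
  unfold Pre_getDiags1; infer_instance

def pvWitness_getDiags1 : List (List Int) :=
  [[1, 2, 3, 4], [5, 6, 7, 8], [9, 10, 11, 12], [13, 14, 15, 16]]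

def Spec_getDiags1 (matrix : List (List Int)) (out : List (List Int)) : Prop := out = getDiags1_alt matrix
instance (matrix : List (List Int)) (out : List (List Int)) : Decidable (Spec_getDiags1 matrix out) := by unfold Spec_getDiags1; infer_instance

-- ===== CLAIM (what is proved, stated in full; the proofs are below) =====
def Claim_equal_getDiags1 : Prop := ∀ (matrix : List (List Int)), Dom_getDiags1 matrix → Pre_getDiags1 matrix → Spec_getDiags1 matrix (getDiags1 matrix)

-- ===== LEMMAS AND PROOFS =====

theorem pv_range_filter_lt (s k : Nat) :
    (List.range s).filter (fun n => n < k) = List.range (min k s) := by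
  induction s with
  | zero => simp
  | succ m ih =>
      rw [List.range_succ, List.filter_append, ih]
      by_cases h : m < k
      · have h2 : min k (m + 1) = min k m + 1 := by omega
        have h3 : min k m = m := by omega
        simp [h, h3, List.range_succ]
      · have h2 : min k (m + 1) = min k m := by omega
        simp [h, h2]

-- the filter in A's comprehensions keeps exactly the first (size - i) indices
theorem pv_filter_range (s i : Nat) (hs : 0 < s) :
    (List.range s).filter (fun n => n + i ≤ s - 1) = List.range (s - i) := by
  have h : (fun n : Nat => decide (n + i ≤ s - 1)) = (fun n : Nat => decide (n < s - i)) := by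
    funext n; simp only [decide_eq_decide]; omega
  calc (List.range s).filter (fun n => n + i ≤ s - 1)
      = (List.range s).filter (fun n => n < s - i) := by rw [h]
    _ = List.range (min (s - i) s) := pv_range_filter_lt s (s - i)
    _ = List.range (s - i) := by rw [Nat.min_eq_left (by omega)]

theorem pv_filter_eq_single (s c0 : Nat) :
    (List.range s).filter (fun c => decide (c = c0)) = if c0 < s then [c0] else [] := by
  induction s with
  | zero => simp
  | succ m ih =>
      rw [List.range_succ, List.filter_append, ih]
      by_cases h : m = c0
      · subst h; simp
      · by_cases h2 : c0 < m
        · simp [h, h2, Nat.lt_succ_of_lt h2]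
        · have h3 : ¬ c0 < m + 1 := by omega
          simp [h, h2, h3]

theorem pv_flatMap_if {α : Type} (l : List Nat) (p : Nat → Bool) (f : Nat → α) :
    l.flatMap (fun a => if p a then [f a] else []) = (l.filter p).map f := by
  induction l with
  | nil => simp
  | cons x xs ih =>
      by_cases h : p x <;> simp [List.flatMap_cons, h, ih]

theorem pv_filter_ge (s i : Nat) (h : i ≤ s) :
    (List.range s).filter (fun r => decide (i ≤ r)) = List.range' i (s - i) := by
  induction s with
  | zero => simp
  | succ m ih =>
      rw [List.range_succ, List.filter_append]
      by_cases h2 : i ≤ m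
      · rw [ih h2]
        have h3 : m + 1 - i = (m - i) + 1 := by omega
        rw [h3, List.range'_concat]
        simp [h2, show i + (m - i) = m from by omega]
      · have hi : i = m + 1 := by omega
        subst hi
        have e1 : (List.range m).filter (fun r => decide (m + 1 ≤ r)) = [] :=
          List.filter_eq_nil_iff.mpr (by intro a ha; simp at ha ⊢; omega)
        rw [e1]
        simp

-- all cells on one pass: buckets.getD k [] selects the cells with r - c = k, row-major
theorem pv_buckets_getD (matrix : List (List Int)) (size : Nat) (k : Int) :
    (pvBuckets matrix size).getD k []
      = (((List.range size).flatMap (fun (r : Nat) => (List.range size).map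
            (fun (c : Nat) => ((r : Int) - (c : Int), (matrix.getD r []).getD c 0)))).filter
            (fun p => p.1 == k)).map (·.2) := by
  have hfold : pvBuckets matrix size
      = ((List.range size).flatMap (fun (r : Nat) => (List.range size).map
            (fun (c : Nat) => ((r : Int) - (c : Int), (matrix.getD r []).getD c 0)))).foldl
          (fun d p => d.modify p.1 [] (· ++ [p.2])) PySem.Dict.empty := by
    rw [List.foldl_flatMap]
    unfold pvBuckets
    apply PySem.List.foldl_congr_mem
    intro d r _
    rw [List.foldl_map]
  rw [hfold, PySem.Dict.getD_foldl_modify_append]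
  simp

-- the bucket at key i is A's diag_vert for offset i
theorem pv_bucket_vert (matrix : List (List Int)) (size i : Nat) (h : i < size) :
    (pvBuckets matrix size).getD ((i : Nat) : Int) []
      = (List.range (size - i)).map (fun n => (matrix.getD (n + i) []).getD n 0) := by
  rw [pv_buckets_getD, List.filter_flatMap, List.map_flatMap]
  trans ((List.range size).flatMap
    (fun r => if decide (i ≤ r) then [(matrix.getD r []).getD (r - i) 0] else []))
  · apply List.flatMap_congr
    intro r hr
    rw [List.mem_range] at hr
    rw [List.filter_map, List.map_map]
    have hpred : ∀ c ∈ List.range size,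
        ((fun p : Int × Int => p.1 == ((i : Nat) : Int)) ∘
          (fun (c : Nat) => ((r : Int) - (c : Int), (matrix.getD r []).getD c 0))) c
          = decide (i ≤ r ∧ c = r - i) := by
      intro c _
      simp only [Function.comp_apply]
      rw [Bool.eq_iff_iff, beq_iff_eq, decide_eq_true_eq]
      omega
    rw [List.filter_congr hpred]
    by_cases hir : i ≤ r
    · have he : (fun c : Nat => decide (i ≤ r ∧ c = r - i)) = (fun c => decide (c = r - i)) := by
        funext c; simp [hir]
      rw [he, pv_filter_eq_single, if_pos (by omega)]
      simp [hir]
    · have he : ∀ c ∈ List.range size, ¬ (decide (i ≤ r ∧ c = r - i) = true) := by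
        intro c _; simp [hir]
      rw [List.filter_eq_nil_iff.mpr he]
      simp [hir]
  · rw [pv_flatMap_if (List.range size) (fun r => decide (i ≤ r))
          (fun r => (matrix.getD r []).getD (r - i) 0),
        pv_filter_ge size i (Nat.le_of_lt h), List.range'_eq_map_range, List.map_map]
    apply List.map_congr_left
    intro n hn
    simp only [Function.comp_apply]
    rw [show i + n = n + i from by omega, show n + i - i = n from by omega]

-- the bucket at key -i is A's diag_horz for offset i
theorem pv_bucket_horz (matrix : List (List Int)) (size i : Nat) (h : i < size) :
    (pvBuckets matrix size).getD (-((i : Nat) : Int)) []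
      = (List.range (size - i)).map (fun n => (matrix.getD n []).getD (n + i) 0) := by
  rw [pv_buckets_getD, List.filter_flatMap, List.map_flatMap]
  trans ((List.range size).flatMap
    (fun r => if decide (r < size - i) then [(matrix.getD r []).getD (r + i) 0] else []))
  · apply List.flatMap_congr
    intro r hr
    rw [List.mem_range] at hr
    rw [List.filter_map, List.map_map]
    have hpred : ∀ c ∈ List.range size,
        ((fun p : Int × Int => p.1 == -((i : Nat) : Int)) ∘
          (fun (c : Nat) => ((r : Int) - (c : Int), (matrix.getD r []).getD c 0))) c
          = decide (c = r + i) := by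
      intro c _
      simp only [Function.comp_apply]
      rw [Bool.eq_iff_iff, beq_iff_eq, decide_eq_true_eq]
      omega
    rw [List.filter_congr hpred, pv_filter_eq_single]
    by_cases hlt : r + i < size
    · rw [if_pos hlt, if_pos (by simpa using (show r < size - i from by omega))]
      simp
    · rw [if_neg hlt, if_neg (by simpa using (show ¬ r < size - i from by omega))]
      simp
  · rw [pv_flatMap_if (List.range size) (fun r => decide (r < size - i))
          (fun r => (matrix.getD r []).getD (r + i) 0)]
    have heq : (List.range size).filter (fun r => decide (r < size - i))
        = List.range (size - i) := by
      rw [pv_range_filter_lt, Nat.min_eq_left (by omega)]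
    rw [heq]

-- ===== VERDICT (by name: the statement is the Claim_ definition above) =====
theorem getDiags1_spec : Claim_equal_getDiags1 := by
  intro matrix _hdom _hpre
  unfold Spec_getDiags1 getDiags1 getDiags1_alt
  by_cases h : 3 < matrix.length
  · rw [if_pos h, if_neg (by omega)]
    have hs : 0 < matrix.length := by omega
    apply Eq.symm
    apply PySem.List.foldl_congr_mem
    intro acc i hi
    rw [List.mem_range] at hi
    rw [pv_filter_range matrix.length i hs]
    by_cases h0 : i = 0
    · subst h0
      simp only [beq_self_eq_true, if_pos, List.foldl_cons, List.foldl_nil, Nat.cast_zero]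
      rw [show (0 : Int) = ((0 : Nat) : Int) from rfl, pv_bucket_vert matrix matrix.length 0 hs]
      simp
    · have hbeq : (i == 0) = false := by simp [h0]
      simp only [hbeq, Bool.false_eq_true, if_false, List.foldl_cons, List.foldl_nil]
      rw [pv_bucket_vert matrix matrix.length i hi, pv_bucket_horz matrix matrix.length i hi]
      simp [Nat.pos_of_ne_zero h0]
  · rw [if_neg h, if_pos (by omega)]
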